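-- pv_equiv track=rewrite | github.com/d-keel/advent-of-code | 2023/2/driver.py | getMaxCubes
-- ===== SOURCE A (Python) =====
-- def getRGB(lis: list[int]) -> tuple[int, int, int]:
--     return lis[0], lis[1], lis[2]
--
-- def getMaxCubes(gameData: list[list[int]]) -> int:
--     #                   R G B
--     needed: list[int] = [0] * 3
--
--     for lis in gameData:
--         r, g, b = getRGB(lis)
--         needed[0] = max(needed[0], r)
--         needed[1] = max(needed[1], g)
--         needed[2] = max(needed[2], b)
--
--     return needed[0] * needed[1] * needed[2]
-- ===== SOURCE B (Python) =====
-- def getMaxCubes(gameData: list[list[int]]) -> int: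
--     # column-wise: product over the three color indices of that column's max (floored at 0)
--     result = 1
--     for i in range(3):
--         m = 0
--         for lis in gameData:
--             if lis[i] > m:
--                 m = lis[i]
--         result *= m
--     return result
-- ===== Notes on version B (the rewrite author's own statement) =====
-- stated objective: alternative
-- what changed: Column-wise reduction: for each of the three color indices separately, one scan computes that column's max (seeded at 0) and the product is accumulated, instead of one row-wise pass maintaining a 3-slot needed array.
import Mathlib
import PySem

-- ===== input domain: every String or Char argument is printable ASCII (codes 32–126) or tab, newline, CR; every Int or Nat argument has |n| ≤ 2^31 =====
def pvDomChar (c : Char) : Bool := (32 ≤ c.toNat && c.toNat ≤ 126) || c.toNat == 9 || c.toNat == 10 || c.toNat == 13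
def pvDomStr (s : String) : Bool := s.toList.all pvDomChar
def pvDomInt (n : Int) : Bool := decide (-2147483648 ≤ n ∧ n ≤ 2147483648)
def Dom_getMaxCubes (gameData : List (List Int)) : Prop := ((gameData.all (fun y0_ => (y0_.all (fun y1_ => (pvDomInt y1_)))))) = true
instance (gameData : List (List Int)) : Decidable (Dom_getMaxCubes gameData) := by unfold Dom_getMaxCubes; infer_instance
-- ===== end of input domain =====

-- B computes the result column-wise: one max-scan per color index, product accumulated; same O(n) cost, different decomposition.


-- ===== PORT A =====
-- getRGB(lis) = (lis[0], lis[1], lis[2]); outside Pre_ (short rows) Python raises IndexError, the port defaults to 0 there.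
def getRGB (lis : List Int) : Int × Int × Int :=
  ((PySem.List.pyGet? lis 0).getD 0, (PySem.List.pyGet? lis 1).getD 0, (PySem.List.pyGet? lis 2).getD 0)

def getMaxCubes (gameData : List (List Int)) : Int :=
  let needed : Int × Int × Int :=
    gameData.foldl (fun n lis =>
      let rgb := getRGB lis
      (max n.1 rgb.1, max n.2.1 rgb.2.1, max n.2.2 rgb.2.2)) (0, 0, 0)
  needed.1 * needed.2.1 * needed.2.2

-- ===== PORT B =====
-- inner scan: m = 0; for lis in gameData: if lis[i] > m: m = lis[i]
def colMax (gameData : List (List Int)) (i : Int) : Int :=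
  gameData.foldl (fun m lis =>
    if (PySem.List.pyGet? lis i).getD 0 > m then (PySem.List.pyGet? lis i).getD 0 else m) 0

def getMaxCubes_alt (gameData : List (List Int)) : Int :=
  (PySem.List.pyRange 0 3 1).foldl (fun result i => result * colMax gameData i) 1

-- ===== PRECONDITION & SPEC =====
-- Pre_ excludes inputs where some row has fewer than 3 elements: there Python A raises IndexError in getRGB.
def Pre_getMaxCubes (gameData : List (List Int)) : Prop := ∀ lis ∈ gameData, 3 ≤ lis.length
instance (gameData : List (List Int)) : Decidable (Pre_getMaxCubes gameData) := by unfold Pre_getMaxCubes; infer_instance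
def pvWitness_getMaxCubes : List (List Int) := [[1, 2, 3], [4, 0, 2]]

def Spec_getMaxCubes (gameData : List (List Int)) (out : Int) : Prop := out = getMaxCubes_alt gameData
instance (gameData : List (List Int)) (out : Int) : Decidable (Spec_getMaxCubes gameData out) := by unfold Spec_getMaxCubes; infer_instance

-- ===== CLAIM (what is proved, stated in full; the proofs are below) =====
def Claim_equal_getMaxCubes : Prop := ∀ (gameData : List (List Int)), Dom_getMaxCubes gameData → Pre_getMaxCubes gameData → Spec_getMaxCubes gameData (getMaxCubes gameData)

-- ===== LEMMAS AND PROOFS =====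

-- the column scan is a running max seeded at m
lemma colMax_fold (gameData : List (List Int)) (i : Int) (m : Int) :
    gameData.foldl (fun m lis =>
      if (PySem.List.pyGet? lis i).getD 0 > m then (PySem.List.pyGet? lis i).getD 0 else m) m
    = gameData.foldl (fun m lis => max m ((PySem.List.pyGet? lis i).getD 0)) m := by
  induction gameData generalizing m with
  | nil => rfl
  | cons h t ih =>
    simp only [List.foldl_cons, ih]
    congr 1
    by_cases hlt : (PySem.List.pyGet? h i).getD 0 > m
    · rw [if_pos hlt, max_eq_right hlt.le]
    · rw [if_neg hlt, max_eq_left (by omega)]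

-- A's triple fold splits into three independent max folds
lemma tripleFold (gameData : List (List Int)) (a b c : Int) :
    gameData.foldl (fun n lis =>
      let rgb := getRGB lis
      (max n.1 rgb.1, max n.2.1 rgb.2.1, max n.2.2 rgb.2.2)) (a, b, c)
    = (gameData.foldl (fun m lis => max m ((PySem.List.pyGet? lis 0).getD 0)) a,
       gameData.foldl (fun m lis => max m ((PySem.List.pyGet? lis 1).getD 0)) b,
       gameData.foldl (fun m lis => max m ((PySem.List.pyGet? lis 2).getD 0)) c) := by
  induction gameData generalizing a b c with
  | nil => rfl
  | cons h t ih =>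
    simp only [List.foldl_cons, getRGB] at ih ⊢
    rw [ih]

-- ===== VERDICT (by name: the statement is the Claim_ definition above) =====
theorem getMaxCubes_spec : Claim_equal_getMaxCubes := by
  intro gameData _ _
  show getMaxCubes gameData = getMaxCubes_alt gameData
  have hr : PySem.List.pyRange 0 3 1 = [0, 1, 2] := by decide
  simp only [getMaxCubes, getMaxCubes_alt, tripleFold, hr, List.foldl_cons, List.foldl_nil,
    colMax, colMax_fold, one_mul]
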